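-- pv_equiv track=rewrite | github.com/hiy17/Eulermation | app/routes.py | format_circuit
-- ===== SOURCE A (Python) =====
-- def format_circuit(circuit_dict):
--     # Get the edges of the first circuit in the dictionary
--     for circuit_name, edges in circuit_dict.items():
--         # Create a dictionary for easy lookup of edges
--         edge_dict = {start: end for start, end in edges}
--
--         # Start with the first vertex of the first edge
--         start_vertex = edges[0][0]
--         formatted_circuit = start_vertex
--         current_vertex = start_vertex
--
--         # Follow the edges and append to the formatted circuit
--         visited_edges = set()  # To avoid revisiting the same edge
--
--         while len(visited_edges) < len(edges):
--             for i, (start, end) in enumerate(edges):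
--                 if start == current_vertex and (start, end) not in visited_edges:
--                     formatted_circuit += f"->{end}"
--                     visited_edges.add((start, end))
--                     current_vertex = end
--                     break
--
--         return formatted_circuit
-- ===== SOURCE B (Python) =====
-- def format_circuit(circuit_dict):
--     # Index edges by start vertex into per-vertex queues (ends stored in
--     # reverse order so pop() yields the earliest remaining edge), then follow
--     # the walk in one pass and join the vertex chain.
--     edges = next(iter(circuit_dict.values()))
--     queues = {}
--     for start, end in reversed(edges):
--         queues.setdefault(start, []).append(end)
--     current = edges[0][0]
--     parts = [current]
--     for _ in range(len(edges)):
--         nxt = queues[current].pop()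
--         parts.append(nxt)
--         current = nxt
--     return "->".join(parts)
-- ===== Notes on version B (the rewrite author's own statement) =====
-- stated objective: alternative
-- what changed: A rescans the whole edge list from the start on every step of the walk; B indexes the edges once into per-start-vertex queues and follows the same greedy walk in a single pass, joining the vertex chain at the end.
-- outside the precondition, e.g. on format_circuit({}): A returns None, B raises StopIteration
import Mathlib
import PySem

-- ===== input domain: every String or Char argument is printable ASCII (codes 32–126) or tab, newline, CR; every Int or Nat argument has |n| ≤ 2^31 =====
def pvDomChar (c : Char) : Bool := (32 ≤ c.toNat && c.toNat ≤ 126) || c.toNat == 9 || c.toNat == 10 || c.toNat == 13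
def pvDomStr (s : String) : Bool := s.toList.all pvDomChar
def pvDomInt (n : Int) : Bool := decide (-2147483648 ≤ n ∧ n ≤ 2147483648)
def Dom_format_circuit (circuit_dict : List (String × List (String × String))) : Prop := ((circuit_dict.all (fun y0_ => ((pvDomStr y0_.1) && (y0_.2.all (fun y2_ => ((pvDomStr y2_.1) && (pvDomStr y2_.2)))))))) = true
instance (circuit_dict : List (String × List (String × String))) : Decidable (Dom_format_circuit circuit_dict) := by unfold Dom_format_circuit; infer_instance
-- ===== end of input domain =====

-- B replaces A's repeated whole-list scan per step of the walk by per-start-vertex queues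
-- built once, then follows the same greedy walk in one pass (objective: alternative).

-- ===== PORT A =====
-- inner `for i, (start, end) in enumerate(edges): if … : break` = first edge from `current` not yet visited
def fcFind (edges : List (String × String)) (visited : PySem.Set (String × String))
    (current : String) : Option (String × String) :=
  edges.find? (fun p => p.1 == current && !(PySem.Set.contains visited p))

-- `while len(visited_edges) < len(edges): …`; fuel = len(edges) covers every terminating run
-- (each iteration that finds an edge adds one distinct edge); when no edge matches, Python
-- loops forever — those inputs are excluded by Pre_ and the port just stops.
def fcWhile (edges : List (String × String)) (visited : PySem.Set (String × String))
    (current formatted : String) : Nat → String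
  | 0 => formatted
  | fuel + 1 =>
    if PySem.Set.len visited < (edges.length : Int) then
      match fcFind edges visited current with
      | some (s, e) => fcWhile edges (PySem.Set.add visited (s, e)) e (formatted ++ "->" ++ e) fuel
      | none => formatted
    else formatted

def format_circuit (circuit_dict : List (String × List (String × String))) : String :=
  match circuit_dict with
  | [] => ""   -- Python falls through the for loop and returns None: excluded by Pre_
  | (_, edges) :: _ =>
    -- `edge_dict = {start: end for start, end in edges}` is dead code in A; kept here:
    let _edge_dict : PySem.Dict String String :=
      edges.foldl (fun d p => d.insert p.1 p.2) PySem.Dict.empty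
    match edges with
    | [] => ""   -- `edges[0]` raises IndexError: excluded by Pre_
    | (s0, _) :: _ => fcWhile edges (PySem.Set.ofList []) s0 s0 edges.length

-- ===== PORT B =====
-- `for start, end in reversed(edges): queues.setdefault(start, []).append(end)`
def fcAltBuild (edges : List (String × String)) : PySem.Dict String (List String) :=
  edges.reverse.foldl (fun d p => d.modify p.1 [] (fun q => q ++ [p.2])) PySem.Dict.empty

-- `for _ in range(len(edges)): nxt = queues[current].pop(); parts.append(nxt); current = nxt`
-- (`queues[current].pop()` raises KeyError/IndexError on a missing or empty queue:
--  those inputs are excluded by Pre_; the port just stops there)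
def fcAltLoop : Nat → PySem.Dict String (List String) → String → List String → List String
  | 0, _, _, parts => parts
  | k + 1, queues, current, parts =>
    match (queues.getD current []).getLast? with
    | none => parts
    | some nxt =>
      fcAltLoop k (queues.insert current (queues.getD current []).dropLast) nxt (parts ++ [nxt])

def format_circuit_alt (circuit_dict : List (String × List (String × String))) : String :=
  match circuit_dict with
  | [] => ""   -- `next(iter(circuit_dict.values()))` raises StopIteration: excluded by Pre_
  | (_, edges) :: _ =>
    match edges with
    | [] => ""   -- `edges[0][0]` raises IndexError: excluded by Pre_
    | (s0, _) :: _ =>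
      PySem.Str.join "->" (fcAltLoop edges.length (fcAltBuild edges) s0 [s0])

-- ===== PRECONDITION & SPEC =====
-- A's greedy walk: from `cur`, repeatedly take the FIRST remaining edge starting at the
-- current vertex, returning the sequence of edge ends (stopping when no edge matches).
-- This vertex sequence is the mathematical characterisation of A's (and B's) walk; Pre_
-- needs it because A's termination depends on the edge ORDER and has no order-free
-- closed form: A returns exactly when this walk visits every edge.
def fcWalkAux : Nat → String → List (String × String) → List String
  | 0, _, _ => []
  | n + 1, cur, es =>
    match es.find? (fun p => p.1 == cur) with
    | none => []
    | some p => p.2 :: fcWalkAux n p.2 (es.erase p)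

-- recursion on the exact number of remaining edges (each step removes one edge)
def fcWalk (cur : String) (es : List (String × String)) : List String :=
  fcWalkAux es.length cur es

-- Pre_ admits exactly the inputs on which Python A RETURNS: a non-empty dict whose first
-- edge list is non-empty, duplicate-free (on a duplicate pair the visited SET can never
-- reach len(edges), so A loops forever) and covered by A's greedy walk (otherwise the walk
-- gets stuck and A loops forever). On an empty dict A returns None, not a string.
def Pre_format_circuit (circuit_dict : List (String × List (String × String))) : Prop :=
  circuit_dict ≠ [] ∧ circuit_dict.headI.2 ≠ [] ∧ circuit_dict.headI.2.Nodup ∧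
    (fcWalk circuit_dict.headI.2.headI.1 circuit_dict.headI.2).length = circuit_dict.headI.2.length

instance (circuit_dict : List (String × List (String × String))) : Decidable (Pre_format_circuit circuit_dict) := by
  unfold Pre_format_circuit; infer_instance

def pvWitness_format_circuit : (List (String × List (String × String))) :=
  [("circuit1", [("a", "b"), ("b", "c"), ("c", "a")])]

def Spec_format_circuit (circuit_dict : List (String × List (String × String))) (out : String) : Prop := out = format_circuit_alt circuit_dict
instance (circuit_dict : List (String × List (String × String))) (out : String) : Decidable (Spec_format_circuit circuit_dict out) := by unfold Spec_format_circuit; infer_instance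

-- ===== CLAIM (what is proved, stated in full; the proofs are below) =====
def Claim_equal_format_circuit : Prop := ∀ (circuit_dict : List (String × List (String × String))), Dom_format_circuit circuit_dict → Pre_format_circuit circuit_dict → Spec_format_circuit circuit_dict (format_circuit circuit_dict)

-- ===== LEMMAS AND PROOFS =====

-- equation lemmas for fcWalk
lemma fcWalk_eq_none {cur : String} {es : List (String × String)}
    (h : es.find? (fun p => p.1 == cur) = none) : fcWalk cur es = [] := by
  cases es with
  | nil => rfl
  | cons a l =>
    show fcWalkAux (l.length + 1) cur (a :: l) = []
    simp [fcWalkAux, h]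

lemma fcWalk_eq_some {cur : String} {es : List (String × String)} {p : String × String}
    (h : es.find? (fun p => p.1 == cur) = some p) :
    fcWalk cur es = p.2 :: fcWalk p.2 (es.erase p) := by
  cases es with
  | nil => simp at h
  | cons a l =>
    have hm : p ∈ a :: l := List.mem_of_find?_eq_some h
    have hlen : ((a :: l).erase p).length = l.length := by
      rw [List.length_erase_of_mem hm]; simp
    show fcWalkAux (l.length + 1) cur (a :: l) = p.2 :: fcWalk p.2 ((a :: l).erase p)
    simp only [fcWalkAux, h]
    rw [fcWalk, hlen]

-- the common closed form: "->e1->e2->…" over a list of edge ends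
def fcArrows : List String → String
  | [] => ""
  | e :: l => "->" ++ e ++ fcArrows l

-- A's while-loop, started with `done` already visited, appends exactly the ends of the
-- greedy walk over the remaining (unvisited) edges.
lemma fcWhile_run : ∀ (n : Nat) (edges done : List (String × String)) (cur fmt : String),
    edges.Nodup → done.Nodup → (∀ p ∈ done, p ∈ edges) →
    n = (edges.filter (fun p => !(PySem.Set.contains done p))).length →
    fcWhile edges done cur fmt n =
      fmt ++ fcArrows (fcWalk cur (edges.filter (fun p => !(PySem.Set.contains done p)))) := by
  intro n
  induction n with
  | zero =>
    intro edges done cur fmt _ _ _ hlen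
    have hrem : edges.filter (fun p => !(PySem.Set.contains done p)) = [] :=
      List.eq_nil_of_length_eq_zero hlen.symm
    rw [hrem, fcWalk_eq_none rfl]
    show fmt = fmt ++ fcArrows []
    simp [fcArrows, String.append_empty]
  | succ n ih =>
    intro edges done cur fmt hedn hdn hsub hlen
    have hremnd : (edges.filter (fun p => !(PySem.Set.contains done p))).Nodup := hedn.filter _
    have hrempos : edges.filter (fun p => !(PySem.Set.contains done p)) ≠ [] := by
      intro h; rw [h] at hlen; simp at hlen
    obtain ⟨x, hx⟩ := List.exists_mem_of_ne_nil _ hrempos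
    have hxe : x ∈ edges := List.mem_of_mem_filter hx
    have hxnd : x ∉ done := by
      have := List.of_mem_filter hx; simpa using this
    have hcond : PySem.Set.len done < (edges.length : Int) := by
      have hsub' : done ⊆ edges.erase x := by
        intro p hp
        exact (hedn.mem_erase_iff).mpr ⟨fun hpx => hxnd (hpx ▸ hp), hsub p hp⟩
      have h1 : done.length ≤ (edges.erase x).length :=
        (List.subperm_of_subset hdn hsub').length_le
      rw [List.length_erase_of_mem hxe] at h1
      have h2 := List.length_pos_of_mem hxe
      simp only [PySem.Set.len]
      omega
    have hfind_eq : fcFind edges done cur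
        = (edges.filter (fun p => !(PySem.Set.contains done p))).find? (fun p => p.1 == cur) := by
      unfold fcFind
      rw [← List.head?_filter, ← List.head?_filter, List.filter_filter]
    cases hfind : (edges.filter (fun p => !(PySem.Set.contains done p))).find? (fun p => p.1 == cur) with
    | none =>
      rw [fcWalk_eq_none hfind]
      show fcWhile edges done cur fmt (n+1) = fmt ++ fcArrows []
      rw [fcWhile, if_pos hcond, hfind_eq, hfind]
      simp [fcArrows, String.append_empty]
    | some p =>
      obtain ⟨ps, pe⟩ := p
      have hpmem : (ps, pe) ∈ edges.filter (fun p => !(PySem.Set.contains done p)) :=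
        List.mem_of_find?_eq_some hfind
      have hpe : (ps, pe) ∈ edges := List.mem_of_mem_filter hpmem
      have hpd : (ps, pe) ∉ done := by
        have := List.of_mem_filter hpmem; simpa using this
      have hrem' : edges.filter (fun q => !(PySem.Set.contains (done ++ [(ps, pe)]) q))
          = (edges.filter (fun p => !(PySem.Set.contains done p))).erase (ps, pe) := by
        rw [hremnd.erase_eq_filter, List.filter_filter]
        apply List.filter_congr
        intro q _
        simp [PySem.Set.contains, Bool.and_comm, bne, Bool.beq_eq_decide_eq]
      have hlen' : n = (edges.filter (fun q => !(PySem.Set.contains (done ++ [(ps, pe)]) q))).length := by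
        rw [hrem', List.length_erase_of_mem hpmem]
        omega
      have hdn' : (done ++ [(ps, pe)]).Nodup := by
        simp only [List.nodup_append, List.nodup_singleton]
        exact ⟨hdn, trivial, fun a ha b hb => by simp at hb; subst hb; exact fun h => hpd (h ▸ ha)⟩
      have hsub' : ∀ q ∈ done ++ [(ps, pe)], q ∈ edges := by
        intro q hq
        rcases List.mem_append.mp hq with h | h
        · exact hsub q h
        · simp at h; subst h; exact hpe
      rw [fcWalk_eq_some hfind]
      show fcWhile edges done cur fmt (n+1) = fmt ++ fcArrows ((ps, pe).2 :: fcWalk (ps, pe).2 ((edges.filter (fun p => !(PySem.Set.contains done p))).erase (ps, pe)))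
      rw [fcWhile, if_pos hcond, hfind_eq, hfind]
      show fcWhile edges (PySem.Set.add done (ps, pe)) pe (fmt ++ "->" ++ pe) n = _
      rw [PySem.Set.add_of_not_mem hpd,
        ih edges (done ++ [(ps, pe)]) pe (fmt ++ "->" ++ pe) hedn hdn' hsub' hlen', hrem']
      simp [fcArrows, String.append_assoc]

-- B's walk loop: if every per-vertex queue holds, in reverse order, the ends of the
-- remaining edges starting there, the loop appends exactly the greedy walk's ends.
lemma fcAltLoop_run : ∀ (n : Nat) (rem : List (String × String))
    (q : PySem.Dict String (List String)) (cur : String) (parts : List String),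
    rem.Nodup → n = rem.length →
    (∀ t : String, q.getD t [] = ((rem.filter (fun p => p.1 == t)).map (·.2)).reverse) →
    fcAltLoop n q cur parts = parts ++ fcWalk cur rem := by
  intro n
  induction n with
  | zero =>
    intro rem q cur parts _ hlen _
    have hrem : rem = [] := List.eq_nil_of_length_eq_zero hlen.symm
    subst hrem
    rw [fcWalk_eq_none rfl]
    simp [fcAltLoop]
  | succ n ih =>
    intro rem q cur parts hnd hlen hq
    have hqcur := hq cur
    cases hf : rem.filter (fun p => p.1 == cur) with
    | nil =>
      have hfind : rem.find? (fun p => p.1 == cur) = none := by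
        rw [← List.head?_filter, hf]; rfl
      rw [fcWalk_eq_none hfind]
      show fcAltLoop (n+1) q cur parts = parts ++ []
      rw [fcAltLoop, hqcur, hf]
      simp
    | cons p ft =>
      have hfind : rem.find? (fun pp => pp.1 == cur) = some p := by
        rw [← List.head?_filter, hf]; rfl
      have hpmem : p ∈ rem := List.mem_of_find?_eq_some hfind
      have hpcur : p.1 = cur := by
        have := List.find?_some hfind; simpa using this
      have hftnd : (p :: ft).Nodup := hf ▸ hnd.filter _
      have hrem' : ∀ t : String, (q.insert cur ((ft.map (·.2)).reverse)).getD t []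
          = (((rem.erase p).filter (fun pp => pp.1 == t)).map (·.2)).reverse := by
        intro t
        rw [PySem.Dict.getD_insert]
        by_cases ht : t = cur
        · subst ht
          rw [if_pos rfl]
          have hfe : (rem.erase p).filter (fun pp => pp.1 == t) = ft := by
            rw [hnd.erase_eq_filter, List.filter_filter]
            have : rem.filter (fun a => a.1 == t && a != p) = (rem.filter (fun pp => pp.1 == t)).filter (fun a => a != p) := by
              rw [List.filter_filter]
              exact List.filter_congr (fun a _ => Bool.and_comm _ _)
            rw [this, hf, List.filter_cons]
            have hall : ∀ a ∈ ft, (a != p) = true := by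
              intro a ha
              have hne : a ≠ p := fun h => (List.nodup_cons.mp hftnd).1 (h ▸ ha)
              simp [hne]
            simp [List.filter_eq_self.mpr hall]
          rw [hfe]
        · rw [if_neg ht, hq t]
          have hfe : (rem.erase p).filter (fun pp => pp.1 == t) = rem.filter (fun pp => pp.1 == t) := by
            rw [hnd.erase_eq_filter, List.filter_filter]
            apply List.filter_congr
            intro a _
            by_cases hat : a.1 = t
            · have hap : a ≠ p := fun h => ht (by rw [← hat, h, hpcur])
              simp [hat, hap]
            · simp [hat]
          rw [hfe]
      have hlen' : n = (rem.erase p).length := by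
        rw [List.length_erase_of_mem hpmem]; omega
      rw [fcWalk_eq_some hfind]
      show fcAltLoop (n+1) q cur parts = parts ++ (p.2 :: fcWalk p.2 (rem.erase p))
      rw [fcAltLoop, hqcur, hf]
      simp only [List.map_cons, List.reverse_cons]
      rw [List.getLast?_concat, List.dropLast_concat]
      show fcAltLoop n (q.insert cur ((ft.map (·.2)).reverse)) p.2 (parts ++ [p.2])
        = parts ++ p.2 :: fcWalk p.2 (rem.erase p)
      rw [ih (rem.erase p) _ p.2 (parts ++ [p.2]) (hnd.erase p) hlen' hrem']
      simp

-- `"->".join(x :: l)` is `x` followed by the arrow form of `l`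
lemma fcJoin_arrow (l : List String) : ∀ (x : String),
    PySem.Str.join "->" (x :: l) = x ++ fcArrows l := by
  induction l with
  | nil =>
    intro x
    apply String.ext
    rw [PySem.Str.toList_join]
    simp [PySem.Chars.join_singleton, fcArrows, String.append_empty]
  | cons y l ih =>
    intro x
    apply String.ext
    rw [PySem.Str.toList_join]
    simp only [List.map_cons, PySem.Chars.join_cons_cons]
    have := congrArg String.toList (ih y)
    rw [PySem.Str.toList_join] at this
    simp only [List.map_cons] at this
    simp only [fcArrows]
    simp only [String.toList_append] at this ⊢
    rw [List.append_assoc, this]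
    simp

-- the initial queues hold, per start vertex, the reversed ends of all edges starting there
lemma fcAltBuild_getD (edges : List (String × String)) (t : String) :
    (fcAltBuild edges).getD t [] = ((edges.filter (fun p => p.1 == t)).map (·.2)).reverse := by
  unfold fcAltBuild
  rw [PySem.Dict.getD_foldl_modify_append]
  simp [PySem.Dict.getD_empty, List.filter_reverse, List.map_reverse]

-- ===== VERDICT (by name: the statement is the Claim_ definition above) =====
theorem format_circuit_spec : Claim_equal_format_circuit := by
  intro circuit_dict _hdom hpre
  unfold Spec_format_circuit
  obtain ⟨hne, hne2, hnd, _hcov⟩ := hpre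
  cases circuit_dict with
  | nil => exact absurd rfl hne
  | cons hd rest =>
    obtain ⟨name, edges⟩ := hd
    simp only [List.headI] at hne2 hnd
    cases edges with
    | nil => exact absurd rfl hne2
    | cons e0p tl =>
      obtain ⟨s0, e0⟩ := e0p
      unfold format_circuit format_circuit_alt
      show fcWhile ((s0, e0) :: tl) (PySem.Set.ofList []) s0 s0 ((s0, e0) :: tl).length
        = PySem.Str.join "->" (fcAltLoop ((s0, e0) :: tl).length (fcAltBuild ((s0, e0) :: tl)) s0 [s0])
      have hfilt : ((s0, e0) :: tl).filter (fun p => !(PySem.Set.contains ([] : PySem.Set (String × String)) p)) = (s0, e0) :: tl := by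
        simp [PySem.Set.contains]
      have hA := fcWhile_run ((s0, e0) :: tl).length ((s0, e0) :: tl) [] s0 s0 hnd
        List.nodup_nil (by simp) (by rw [hfilt])
      rw [hfilt] at hA
      have hB := fcAltLoop_run ((s0, e0) :: tl).length ((s0, e0) :: tl) (fcAltBuild ((s0, e0) :: tl)) s0 [s0]
        hnd rfl (fun t => fcAltBuild_getD ((s0, e0) :: tl) t)
      rw [PySem.Set.ofList_nil, hA, hB, List.singleton_append, fcJoin_arrow]
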